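-- pv_equiv track=rewrite | github.com/yuchanmo/python1_class | 과제/hw2_14b.py | sort_repeated
-- ===== SOURCE A (Python) =====
-- def sort_repeated(l):
--     dic={}
--     for v in l:
--         if v in dic:
--             dic[v]+=1
--         else:
--             dic[v]=1
--     #return dic
--     return sorted(list(map(lambda x : x[0],filter(lambda x:x[1]>1,dic.items()))))
-- ===== SOURCE B (Python) =====
-- def sort_repeated(l):
--     s = sorted(l)
--     res = []
--     i = 0
--     n = len(s)
--     while i < n:
--         j = i + 1
--         while j < n and s[j] == s[i]:
--             j += 1
--         if j - i > 1:
--             res.append(s[i])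
--         i = j
--     return res
-- ===== Notes on version B (the rewrite author's own statement) =====
-- stated objective: alternative
-- what changed: Replaces the frequency-dict-then-sort strategy with sort-first then a single linear pass grouping consecutive equal runs, appending each value whose run is longer than 1 (already in sorted order, no second sort).
import Mathlib
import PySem

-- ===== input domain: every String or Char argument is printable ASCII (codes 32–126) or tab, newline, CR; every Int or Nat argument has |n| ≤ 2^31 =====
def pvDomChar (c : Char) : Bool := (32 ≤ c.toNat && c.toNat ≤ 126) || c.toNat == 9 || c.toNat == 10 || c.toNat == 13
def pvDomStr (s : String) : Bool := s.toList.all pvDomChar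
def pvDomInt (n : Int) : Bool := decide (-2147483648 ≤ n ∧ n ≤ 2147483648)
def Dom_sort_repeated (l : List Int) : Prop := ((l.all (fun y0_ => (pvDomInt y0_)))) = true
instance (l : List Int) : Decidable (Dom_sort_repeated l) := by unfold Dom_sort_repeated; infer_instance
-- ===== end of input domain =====

-- B replaces A's frequency-dict-then-sort with sort-first then one linear pass over
-- consecutive equal runs (alternative decomposition; same asymptotic cost).

-- ===== PORT A =====
-- dic = {}; for v in l: increment dic[v] if v in dic else set dic[v] = 1;
-- return sorted(map(fst, filter(snd > 1, dic.items())))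
def sort_repeated (l : List Int) : List Int :=
  let dic := l.foldl (fun d v =>
    if d.contains v then d.insert v (d.getD v 0 + 1) else d.insert v 1)
    (PySem.Dict.empty : PySem.Dict Int Int)
  PySem.List.sorted ((dic.items.filter (fun x => decide (x.2 > 1))).map (fun x => x.1))
    (fun x => x) false

-- ===== PORT B =====
-- the outer while loop of Source B: each iteration consumes the run of elements equal to
-- the current head (the inner while), appending the head if the run length j - i > 1
def collectRuns (s : List Int) : List Int :=
  match s with
  | [] => []
  | x :: xs =>
    let run := xs.takeWhile (fun y => y == x)
    let rest := xs.dropWhile (fun y => y == x)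
    if run.length + 1 > 1 then x :: collectRuns rest else collectRuns rest
termination_by s.length
decreasing_by
  · simpa using Nat.lt_succ_of_le (List.length_dropWhile_le _ _)
  · simpa using Nat.lt_succ_of_le (List.length_dropWhile_le _ _)

def sort_repeated_alt (l : List Int) : List Int :=
  collectRuns (PySem.List.sorted l (fun x => x) false)

-- ===== PRECONDITION & SPEC =====
def Spec_sort_repeated (l : List Int) (out : List Int) : Prop := out = sort_repeated_alt l
instance (l : List Int) (out : List Int) : Decidable (Spec_sort_repeated l out) := by unfold Spec_sort_repeated; infer_instance

-- ===== CLAIM (what is proved, stated in full; the proofs are below) =====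
def Claim_equal_sort_repeated : Prop := ∀ (l : List Int), Dom_sort_repeated l → Spec_sort_repeated l (sort_repeated l)

-- ===== LEMMAS AND PROOFS =====

lemma collectRuns_cons (x : Int) (xs : List Int) :
    collectRuns (x :: xs) =
      if (xs.takeWhile (fun y => y == x)).length + 1 > 1
      then x :: collectRuns (xs.dropWhile (fun y => y == x))
      else collectRuns (xs.dropWhile (fun y => y == x)) := by
  rw [collectRuns]

-- every element remaining after dropping the leading run of x's is strictly above x
lemma dropWhile_gt (x : Int) (xs : List Int) (hs : xs.Pairwise (· ≤ ·))
    (hx : ∀ y ∈ xs, x ≤ y) :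
    ∀ y ∈ xs.dropWhile (fun y => y == x), x < y := by
  induction xs with
  | nil => simp
  | cons a as ih =>
    rw [List.pairwise_cons] at hs
    by_cases ha : a = x
    · subst ha
      simp only [List.dropWhile_cons, beq_self_eq_true, if_true]
      exact ih hs.2 (fun y hy => hs.1 y hy)
    · have hxa : x < a := lt_of_le_of_ne (hx a (by simp)) (Ne.symm ha)
      simp only [List.dropWhile_cons, beq_iff_eq, ha, if_false]
      intro y hy
      rcases hy with _ | hy
      · exact hxa
      · exact lt_of_lt_of_le hxa (hs.1 y (by assumption))

-- on a sorted list, collectRuns collects exactly the values of count > 1, strictly increasing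
lemma collectRuns_spec (s : List Int) (hs : s.Pairwise (· ≤ ·)) :
    (∀ x, x ∈ collectRuns s ↔ 1 < s.count x) ∧ (collectRuns s).Pairwise (· < ·) := by
  induction s using collectRuns.induct with
  | case1 => simp [collectRuns]
  | case2 x xs run rest hr ih | case3 x xs run rest hr ih =>
    clear hr
    have hrundef : run = xs.takeWhile (fun y => y == x) := rfl
    have hrestdef : rest = xs.dropWhile (fun y => y == x) := rfl
    rw [List.pairwise_cons] at hs
    have hrest_pw : rest.Pairwise (· ≤ ·) :=
      List.Pairwise.sublist (List.dropWhile_sublist _) hs.2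
    have hgt : ∀ y ∈ rest, x < y := dropWhile_gt x xs hs.2 hs.1
    obtain ⟨ihm, ihp⟩ := ih hrest_pw
    have hsplit : run ++ rest = xs := List.takeWhile_append_dropWhile
    have hrun_eq : ∀ y ∈ run, y = x := by
      intro y hy
      have := List.mem_takeWhile_imp hy
      simpa using this
    have hx_rest : x ∉ rest := fun h => lt_irrefl x (hgt x h)
    have hcount : ∀ y : Int, (x :: xs).count y =
        (if y = x then 1 + run.length else 0) + rest.count y := by
      intro y
      rw [List.count_cons, ← hsplit, List.count_append]
      by_cases h : y = x
      · subst h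
        rw [List.count_eq_length.mpr (fun b hb => (hrun_eq b hb).symm)]
        simp
        omega
      · have h' : ¬x = y := fun e => h e.symm
        rw [List.count_eq_zero.mpr (fun hy => h (hrun_eq y hy))]
        simp [h, h']
    constructor
    · intro y
      rw [hcount y, collectRuns_cons, ← hrestdef, ← hrundef]
      by_cases hy : y = x
      · subst hy
        rw [List.count_eq_zero.mpr hx_rest, if_pos rfl]
        split_ifs with hb
        · exact iff_of_true (by simp) (by omega)
        · rw [ihm y, List.count_eq_zero.mpr hx_rest]
          omega
      · rw [if_neg hy]
        split_ifs with hb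
        · simp only [List.mem_cons, ihm y, hy, false_or, Nat.zero_add]
        · rw [ihm y]
          omega
    · rw [collectRuns_cons, ← hrestdef, ← hrundef]
      split_ifs with hb
      · refine List.pairwise_cons.mpr ⟨?_, ihp⟩
        intro z hz
        have h1 : 1 < rest.count z := (ihm z).mp hz
        exact hgt z (List.count_pos_iff.mp (by omega))
      · exact ihp

-- A's counting loop builds exactly Counter(l): on a missing key getD gives 0, so both branches insert getD+1
lemma fold_eq_counter (l : List Int) :
    l.foldl (fun d v =>
      if d.contains v then d.insert v (d.getD v 0 + 1) else d.insert v 1)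
      (PySem.Dict.empty : PySem.Dict Int Int) = PySem.Dict.counter l := by
  rw [← PySem.Dict.foldl_insert_getD_add_one_eq_counter]
  congr 1
  funext d v
  by_cases h : d.contains v
  · simp [h]
  · simp only [Bool.not_eq_true] at h
    simp [h, PySem.Dict.getD_of_not_contains d 0 h]

theorem sort_repeated_eq (l : List Int) : sort_repeated l = sort_repeated_alt l := by
  have hs : (PySem.List.sorted l (fun x => x) false).Pairwise (· ≤ ·) :=
    PySem.List.sorted_pairwise l (fun x => x)
  obtain ⟨hmem, hpw⟩ := collectRuns_spec _ hs
  have hcnt : ∀ x : Int, (PySem.List.sorted l (fun x => x) false).count x = l.count x :=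
    fun x => (PySem.List.sorted_perm l (fun x => x) false).count_eq x
  unfold sort_repeated sort_repeated_alt
  simp only [fold_eq_counter]
  rw [PySem.Dict.items_counter, List.filter_map, List.map_map]
  apply PySem.List.sorted_eq_of_perm_of_pairwise_lt
  · -- collectRuns(sorted l) is a permutation of the filtered key list: both Nodup, same membership
    apply (List.perm_ext_iff_of_nodup ?_ ?_).mpr
    · intro a
      simp only [hmem a, hcnt a, List.mem_map, List.mem_filter, Function.comp]
      constructor
      · intro h
        refine ⟨a, ⟨?_, ?_⟩, rfl⟩
        · exact (PySem.Set.mem_ofList _ _).mpr (List.count_pos_iff.mp (by omega))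
        · simp; exact_mod_cast h
      · rintro ⟨b, ⟨hb1, hb2⟩, rfl⟩
        simp at hb2
        exact_mod_cast hb2
    · exact hpw.imp (fun h => ne_of_lt h)
    · refine List.Nodup.map ?_ (List.Nodup.filter _ (PySem.Set.nodup_ofList _))
      intro a b h
      simpa using h
  · exact hpw

-- ===== VERDICT (by name: the statement is the Claim_ definition above) =====
theorem sort_repeated_spec : Claim_equal_sort_repeated := by
  intro l _
  exact sort_repeated_eq l
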